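-- pv_equiv track=rewrite | github.com/phuong27102000/NTRU_HRSS_KEM_SV | Draft_Nhat/Packed_in_Rq/Python/sample.py | arr_to_str_ternary
-- ===== SOURCE A (Python) =====
-- def arr_to_str_ternary(bit_arr):
--     str=''
--     i=len(bit_arr)-1
--     while i>=0:
--         b = format(bit_arr[i] & 0x3, '2b')
--         m = 0
--         b1 = ''
--         while m < len(b):
--             if b[m] == ' ':
--                 b1 = b1 + '0'
--             else:
--                 b1 = b1 + b[m]
--             m = m + 1
--         str=str+b1
--         i=i-1
--     str=int(str,2)
--     return str
-- ===== SOURCE B (Python) =====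
-- def arr_to_str_ternary(bit_arr):
--     result = 0
--     power = 1
--     for v in bit_arr:
--         result += (v & 3) * power
--         power *= 4
--     return result
-- ===== Notes on version B (the rewrite author's own statement) =====
-- stated objective: simpler
-- what changed: B accumulates the packed value with pure integer arithmetic in one forward pass (result += (v & 3) * power), replacing A's backward loop that formats each element to a 2-char binary string, patches spaces to zeros in an inner loop, concatenates, and finally parses with int(s, 2).
-- outside the precondition, e.g. on arr_to_str_ternary([]): A raises ValueError, B returns 0
-- crash fix: On the empty list A raises ValueError (int('', 2)); B naturally returns 0. — e.g. on arr_to_str_ternary([]): A raises ValueError, B returns 0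
import Mathlib
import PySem

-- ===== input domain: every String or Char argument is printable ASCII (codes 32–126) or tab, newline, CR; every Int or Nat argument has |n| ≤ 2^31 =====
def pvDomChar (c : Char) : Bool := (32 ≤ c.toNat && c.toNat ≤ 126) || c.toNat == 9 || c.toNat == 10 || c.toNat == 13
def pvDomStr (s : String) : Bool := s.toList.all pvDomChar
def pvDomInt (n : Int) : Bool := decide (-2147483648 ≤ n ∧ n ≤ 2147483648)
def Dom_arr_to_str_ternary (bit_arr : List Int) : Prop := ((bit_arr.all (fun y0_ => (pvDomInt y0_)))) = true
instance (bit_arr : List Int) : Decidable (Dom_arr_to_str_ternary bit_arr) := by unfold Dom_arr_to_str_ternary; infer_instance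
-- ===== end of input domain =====

-- B packs the 2-bit groups by integer arithmetic in one forward pass instead of A's
-- backward binary-string building + int(s,2) parse; on the empty list A raises ValueError
-- (excluded by Pre_) while B returns 0 (Raises_ block).


-- ===== PORT A =====
-- format(w, '2b') for 0 ≤ w < 4 (the only values reaching it: w = bit_arr[i] & 0x3):
-- binary, right-aligned to width 2 with a space; exact on that range.
def pvFmt2b (w : Int) : List Char :=
  if w < 2 then [' ', if w = 1 then '1' else '0']
  else ['1', if w = 3 then '1' else '0']

-- inner while loop over b with accumulator b1: replace ' ' by '0', keep other chars
def pvAInner (b : List Char) (b1 : List Char) : List Char :=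
  match b with
  | [] => b1
  | c :: r => pvAInner r (b1 ++ [if c = ' ' then '0' else c])

-- outer while loop: counter n+1 means current index i = n; appends group(i) then i := i-1.
-- bit_arr[i] & 0x3 is ported as bit_arr[i] % 4 (Python's & 3 equals its floor-mod 4 exactly);
-- the index is always in range, so getD's default is never used.
def pvAOuter (bit_arr : List Int) : Nat → List Char → List Char
  | 0, s => s
  | n + 1, s => pvAOuter bit_arr n (s ++ pvAInner (pvFmt2b (bit_arr.getD n 0 % 4)) [])

-- int(s, 2): exact for the nonempty '0'/'1' strings A builds (Pre_ excludes the empty list,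
-- on which Python's int('', 2) raises ValueError)
def pvParse2 (s : List Char) : Int :=
  s.foldl (fun a c => 2 * a + (if c = '1' then 1 else 0)) 0

def arr_to_str_ternary (bit_arr : List Int) : Int :=
  pvParse2 (pvAOuter bit_arr bit_arr.length [])

-- ===== PORT B =====
-- one forward pass with state (result, power); (v & 3) is v % 4 exactly, '<<= 2' is '*= 4'
def arr_to_str_ternary_alt (bit_arr : List Int) : Int :=
  (bit_arr.foldl (fun st v => (st.1 + v % 4 * st.2, st.2 * 4)) ((0 : Int), (1 : Int))).1

-- ===== PRECONDITION & SPEC =====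
-- A raises ValueError on the empty list (int('', 2)); Pre_ excludes exactly that input.
def Pre_arr_to_str_ternary (bit_arr : List Int) : Prop := bit_arr ≠ []
instance (bit_arr : List Int) : Decidable (Pre_arr_to_str_ternary bit_arr) := by
  unfold Pre_arr_to_str_ternary; infer_instance

def pvWitness_arr_to_str_ternary : List Int := [1, 2, 3]

-- On the empty list A raises ValueError (int('', 2)); B naturally returns 0.
def Raises_arr_to_str_ternary (bit_arr : List Int) : Prop := bit_arr = []
instance (bit_arr : List Int) : Decidable (Raises_arr_to_str_ternary bit_arr) := by
  unfold Raises_arr_to_str_ternary; infer_instance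
def pvRaiseWitness_arr_to_str_ternary : List Int := []
def pvRaiseWitnessOut_arr_to_str_ternary : Int := 0

def Spec_arr_to_str_ternary (bit_arr : List Int) (out : Int) : Prop := out = arr_to_str_ternary_alt bit_arr
instance (bit_arr : List Int) (out : Int) : Decidable (Spec_arr_to_str_ternary bit_arr out) := by unfold Spec_arr_to_str_ternary; infer_instance

-- ===== CLAIM (what is proved, stated in full; the proofs are below) =====
def Claim_equal_arr_to_str_ternary : Prop := ∀ (bit_arr : List Int), Dom_arr_to_str_ternary bit_arr → Pre_arr_to_str_ternary bit_arr → Spec_arr_to_str_ternary bit_arr (arr_to_str_ternary bit_arr)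

def Claim_raises_arr_to_str_ternary : Prop := (∀ (bit_arr : List Int), Dom_arr_to_str_ternary bit_arr → Raises_arr_to_str_ternary bit_arr → ¬ Pre_arr_to_str_ternary bit_arr) ∧ (Dom_arr_to_str_ternary (pvRaiseWitness_arr_to_str_ternary) ∧ Raises_arr_to_str_ternary (pvRaiseWitness_arr_to_str_ternary) ∧ arr_to_str_ternary_alt (pvRaiseWitness_arr_to_str_ternary) = pvRaiseWitnessOut_arr_to_str_ternary)

-- ===== LEMMAS AND PROOFS =====

-- value both sides compute: Σ_i (bit_arr[i] % 4) · 4^i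
def pvVal : List Int → Int
  | [] => 0
  | v :: t => v % 4 + 4 * pvVal t

-- the string A's outer loop builds (groups for indices n-1 … 0, most significant first)
def pvGstr (l : List Int) : Nat → List Char
  | 0 => []
  | n + 1 => pvAInner (pvFmt2b (l.getD n 0 % 4)) [] ++ pvGstr l n

theorem pvAOuter_eq (l : List Int) (n : Nat) (s : List Char) :
    pvAOuter l n s = s ++ pvGstr l n := by
  induction n generalizing s with
  | zero => simp [pvAOuter, pvGstr]
  | succ n ih =>
    simp only [pvAOuter, pvGstr]
    rw [ih]
    simp

theorem pvParse2_acc (s : List Char) (a : Int) :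
    s.foldl (fun a c => 2 * a + (if c = '1' then 1 else 0)) a
      = a * 2 ^ s.length + pvParse2 s := by
  induction s generalizing a with
  | nil => simp [pvParse2]
  | cons c r ih =>
    simp only [List.foldl, pvParse2, List.length_cons]
    rw [ih, ih (2 * 0 + (if c = '1' then 1 else 0))]
    ring

theorem pvParse2_append (s t : List Char) :
    pvParse2 (s ++ t) = pvParse2 s * 2 ^ t.length + pvParse2 t := by
  simp only [pvParse2, List.foldl_append]
  rw [pvParse2_acc t (List.foldl _ 0 s)]
  rfl

theorem pvGroup_len (w : Int) : (pvAInner (pvFmt2b w) []).length = 2 := by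
  unfold pvFmt2b
  split_ifs <;> simp [pvAInner]

theorem pvGroup_parse (v : Int) : pvParse2 (pvAInner (pvFmt2b (v % 4)) []) = v % 4 := by
  have h : v % 4 = 0 ∨ v % 4 = 1 ∨ v % 4 = 2 ∨ v % 4 = 3 := by omega
  rcases h with h | h | h | h <;> rw [h] <;> decide

theorem pvGstr_len (l : List Int) (n : Nat) : (pvGstr l n).length = 2 * n := by
  induction n with
  | zero => simp [pvGstr]
  | succ k ihk =>
    simp [pvGstr, pvGroup_len, ihk]; omega

theorem pvGstr_parse (l : List Int) (n : Nat) (hn : n ≤ l.length) :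
    pvParse2 (pvGstr l n) = pvVal (l.take n) := by
  induction n with
  | zero => simp [pvGstr, pvVal, pvParse2]
  | succ n ih =>
    have hn' : n < l.length := hn
    simp only [pvGstr]
    rw [pvParse2_append, ih (le_of_lt hn')]
    rw [pvGstr_len, pvGroup_parse]
    -- relate pvVal of take (n+1) with take n
    have htake : l.take (n + 1) = l.take n ++ [l.getD n 0] := by
      rw [List.take_add_one]
      congr 1
      rw [List.getElem?_eq_getElem hn']
      simp [List.getD, List.getElem?_eq_getElem hn']
    rw [htake]
    have hsnoc : ∀ (m : List Int) (x : Int),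
        pvVal (m ++ [x]) = pvVal m + x % 4 * 4 ^ m.length := by
      intro m x
      induction m with
      | nil => simp [pvVal]
      | cons y t iht => simp [pvVal, iht]; ring
    rw [hsnoc]
    have : (l.take n).length = n := List.length_take_of_le (le_of_lt hn')
    rw [this]
    have : (2 : Int) ^ (2 * n) = 4 ^ n := by
      rw [pow_mul]; norm_num
    rw [this]; ring

theorem pvAlt_fold (l : List Int) (r p : Int) :
    (l.foldl (fun st v => (st.1 + v % 4 * st.2, st.2 * 4)) (r, p)).1 = r + p * pvVal l := by
  induction l generalizing r p with
  | nil => simp [pvVal]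
  | cons v t ih =>
    simp only [List.foldl, pvVal]
    rw [ih]
    ring

-- ===== VERDICT (by name: the statement is the Claim_ definition above) =====
theorem arr_to_str_ternary_spec : Claim_equal_arr_to_str_ternary := by
  intro bit_arr _ _
  unfold Spec_arr_to_str_ternary arr_to_str_ternary arr_to_str_ternary_alt
  rw [pvAOuter_eq, pvAlt_fold]
  simp only [List.nil_append]
  rw [pvGstr_parse bit_arr bit_arr.length le_rfl, List.take_length]
  ring

@[simp] theorem arr_to_str_ternary_raises : Claim_raises_arr_to_str_ternary := by
  unfold Claim_raises_arr_to_str_ternary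
  constructor
  · intro bit_arr _ h
    unfold Raises_arr_to_str_ternary at h
    unfold Pre_arr_to_str_ternary
    simp [h]
  · exact ⟨by decide, by decide, by decide⟩
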